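-- pv_equiv track=rewrite | github.com/tariq-hasan/leetcode | coding_patterns/07-graphs/01-graph-traversal/medium_1926_nearest_exit_from_entrance_in_maze.py | nearestExit_dfs
-- ===== SOURCE A (Python) =====
-- from typing import List
--
-- def nearestExit_dfs(maze: List[List[str]], entrance: List[int]) -> int:
--     """
--     Solution 4: DFS approach (NOT recommended for interviews)
--
--     DFS doesn't guarantee shortest path without additional logic.
--     Included for completeness but BFS is always better for shortest path.
--
--     Time Complexity: O(4^(m*n)) in worst case - exponential
--     Space Complexity: O(m * n) - recursion stack
--     """
--     def dfs(row: int, col: int, steps: int, visited: set) -> int: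
--         # Check if current position is an exit
--         if ((row == 0 or row == len(maze) - 1 or col == 0 or col == len(maze[0]) - 1)
--             and [row, col] != entrance):
--             return steps
--
--         visited.add((row, col))
--         min_steps = float('inf')
--
--         directions = [(-1, 0), (1, 0), (0, -1), (0, 1)]
--         for dr, dc in directions:
--             new_row, new_col = row + dr, col + dc
--
--             if (0 <= new_row < len(maze) and 0 <= new_col < len(maze[0]) and
--                 maze[new_row][new_col] == '.' and (new_row, new_col) not in visited):
--
--                 result = dfs(new_row, new_col, steps + 1, visited.copy())
--                 min_steps = min(min_steps, result)
--
--         return min_steps if min_steps != float('inf') else -1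
--
--     return dfs(entrance[0], entrance[1], 0, set())
-- ===== SOURCE B (Python) =====
-- from typing import List
--
-- def nearestExit_dfs(maze: List[List[str]], entrance: List[int]) -> int:
--     """
--     Explicit-stack enumeration of every maximal simple path from the entrance.
--     Each finished path gets a score: its length when it ends on a border cell
--     (other than the entrance itself), or -1 when it gets stuck inside the maze.
--     The result is the minimum score over all paths, -1 when there is none.
--     """
--     m, n = len(maze), len(maze[0])
--     outcomes = []
--     stack = [(entrance[0], entrance[1], 0, frozenset())]
--     while stack:
--         r, c, steps, seen = stack.pop()
--         if (r == 0 or r == m - 1 or c == 0 or c == n - 1) and [r, c] != entrance: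
--             outcomes.append(steps)
--             continue
--         seen = seen | {(r, c)}
--         nxt = [(r + dr, c + dc) for dr, dc in ((-1, 0), (1, 0), (0, -1), (0, 1))
--                if 0 <= r + dr < m and 0 <= c + dc < n
--                and maze[r + dr][c + dc] == '.' and (r + dr, c + dc) not in seen]
--         if nxt:
--             stack.extend((nr, nc, steps + 1, seen) for nr, nc in nxt)
--         else:
--             outcomes.append(-1)
--     return min(outcomes, default=-1)
-- ===== Notes on version B (the rewrite author's own statement) =====
-- stated objective: alternative
-- what changed: The recursive DFS that combines per-call results with min over float('inf') is replaced by an explicit-stack traversal that merely collects the score of every maximal simple path (its length at a border cell, -1 when stuck) into one list and takes a single min(..., default=-1) at the end.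
-- outside the precondition, e.g. on nearestExit_dfs([], [0, 10, -1]): A returns 0, B raises IndexError; on nearestExit_dfs([['+', '+', '+'], ['+', '.', '.'], ['+']], [0, 0]): A returns -1, B returns -1
import Mathlib
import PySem

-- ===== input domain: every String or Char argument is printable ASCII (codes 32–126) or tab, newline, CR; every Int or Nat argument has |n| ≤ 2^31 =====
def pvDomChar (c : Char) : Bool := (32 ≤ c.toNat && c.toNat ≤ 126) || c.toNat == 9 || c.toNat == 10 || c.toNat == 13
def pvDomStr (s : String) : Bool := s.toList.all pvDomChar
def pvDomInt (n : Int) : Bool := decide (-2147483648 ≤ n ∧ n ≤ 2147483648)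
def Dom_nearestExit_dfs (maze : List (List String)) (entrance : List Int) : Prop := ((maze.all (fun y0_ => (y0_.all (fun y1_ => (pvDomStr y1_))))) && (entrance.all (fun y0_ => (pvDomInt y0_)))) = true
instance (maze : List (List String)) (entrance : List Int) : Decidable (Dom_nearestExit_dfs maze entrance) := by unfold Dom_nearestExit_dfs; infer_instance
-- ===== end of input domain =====

-- B replaces A's recursive DFS (per-call minimum over float('inf')) by an explicit-stack
-- traversal that collects the score of every maximal simple path into one list and takes a
-- single min(..., default=-1) at the end (objective: alternative decomposition, same value).

-- ===== PORT A =====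
def pvCell (maze : List (List String)) (r c : Int) : String :=
  (PySem.List.pyGet? ((PySem.List.pyGet? maze r).getD []) c).getD ""

def pvIsExit (maze : List (List String)) (entrance : List Int) (row col : Int) : Bool :=
  (row == 0 || row == (maze.length : Int) - 1 || col == 0 || col == ((maze.headD []).length : Int) - 1)
    && !([row, col] == entrance)

def pvOk (maze : List (List String)) (v : PySem.Set (Int × Int)) (nr nc : Int) : Bool :=
  decide (0 ≤ nr) && decide (nr < (maze.length : Int)) &&
  decide (0 ≤ nc) && decide (nc < ((maze.headD []).length : Int)) &&
  (pvCell maze nr nc == ".") && !(PySem.Set.contains v (nr, nc))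

-- termination measure for A's DFS: twice the number of in-bounds cells not yet visited,
-- plus 1 if the current cell cannot itself be marked off (out of bounds or already visited)
def pvGridCells (maze : List (List String)) : List (Int × Int) :=
  (PySem.List.pyRange 0 (maze.length : Int) 1).flatMap
    (fun i => (PySem.List.pyRange 0 ((maze.headD []).length : Int) 1).map (fun j => (i, j)))

def pvMu (maze : List (List String)) (v : PySem.Set (Int × Int)) (r c : Int) : Nat :=
  2 * ((pvGridCells maze).filter (fun p => !(PySem.Set.contains v p))).length +
  (if (decide (0 ≤ r) && decide (r < (maze.length : Int)) && decide (0 ≤ c) &&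
       decide (c < ((maze.headD []).length : Int)) && !(PySem.Set.contains v (r, c))) = true
   then 0 else 1)

theorem pvFilter_length_lt {α : Type} (p q : α → Bool) (l : List α) (x : α)
    (hx : x ∈ l) (hpq : ∀ a, q a = true → p a = true)
    (hpx : p x = true) (hqx : q x = false) :
    (l.filter q).length < (l.filter p).length := by
  induction l with
  | nil => cases hx
  | cons a t ih =>
    have hmono : (t.filter q).length ≤ (t.filter p).length :=
      (List.monotone_filter_right t (fun a ha => hpq a ha)).length_le
    by_cases hax : a = x
    · subst hax
      simp only [List.filter, hpx, hqx]
      simpa using Nat.lt_succ_of_le hmono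
    · have hx' : x ∈ t := by
        rcases List.mem_cons.mp hx with h | h
        · exact absurd h.symm hax
        · exact h
      have h := ih hx'
      simp only [List.filter]
      cases hq : q a
      · cases hp : p a <;> simp <;> omega
      · rw [hpq a hq]; simpa using h

theorem pvMem_gridCells (maze : List (List String)) (p : Int × Int) :
    p ∈ pvGridCells maze ↔
      0 ≤ p.1 ∧ p.1 < (maze.length : Int) ∧ 0 ≤ p.2 ∧ p.2 < ((maze.headD []).length : Int) := by
  obtain ⟨a, b⟩ := p
  simp only [pvGridCells, List.mem_flatMap, List.mem_map, PySem.List.mem_pyRange_one]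
  constructor
  · rintro ⟨i, hi, j, hj, h⟩
    obtain ⟨rfl, rfl⟩ : i = a ∧ j = b := Prod.mk.injEq .. ▸ h
    exact ⟨hi.1, hi.2, hj.1, hj.2⟩
  · rintro ⟨ha, ha2, hb, hb2⟩
    exact ⟨a, ⟨ha, ha2⟩, b, ⟨hb, hb2⟩, rfl⟩

-- the step a child call makes: marking the current cell and moving to a usable neighbour
-- strictly decreases the measure
theorem pvMu_lt (maze : List (List String)) (vis : PySem.Set (Int × Int)) (r c nr nc : Int)
    (h : pvOk maze (PySem.Set.add vis (r, c)) nr nc = true) :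
    pvMu maze (PySem.Set.add vis (r, c)) nr nc < pvMu maze vis r c := by
  simp only [pvOk, Bool.and_eq_true, decide_eq_true_eq, Bool.not_eq_true'] at h
  obtain ⟨⟨⟨⟨⟨h1, h2⟩, h3⟩, h4⟩, -⟩, h6⟩ := h
  have hnmem : (nr, nc) ∉ PySem.Set.add vis (r, c) := by
    rw [PySem.Set.contains_eq_decide] at h6
    simpa using h6
  have hchild0 : pvMu maze (PySem.Set.add vis (r, c)) nr nc =
      2 * ((pvGridCells maze).filter
            (fun p => !(PySem.Set.contains (PySem.Set.add vis (r, c)) p))).length := by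
    have : (decide (0 ≤ nr) && decide (nr < (maze.length : Int)) && decide (0 ≤ nc) &&
        decide (nc < ((maze.headD []).length : Int)) &&
        !(PySem.Set.contains (PySem.Set.add vis (r, c)) (nr, nc))) = true := by
      rw [PySem.Set.contains_eq_decide]
      simp only [Bool.and_eq_true, decide_eq_true_eq, Bool.not_eq_true',
        decide_eq_false_iff_not]
      exact ⟨⟨⟨⟨h1, h2⟩, h3⟩, h4⟩, hnmem⟩
    rw [pvMu, if_pos this, Nat.add_zero]
  by_cases hrc : 0 ≤ r ∧ r < (maze.length : Int) ∧ 0 ≤ c ∧ c < ((maze.headD []).length : Int) ∧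
      (r, c) ∉ vis
  · -- the current cell is a fresh in-bounds cell: the unvisited count strictly drops
    have hlt : ((pvGridCells maze).filter
          (fun p => !(PySem.Set.contains (PySem.Set.add vis (r, c)) p))).length <
        ((pvGridCells maze).filter (fun p => !(PySem.Set.contains vis p))).length := by
      apply pvFilter_length_lt _ _ _ (r, c)
      · exact (pvMem_gridCells maze (r, c)).mpr ⟨hrc.1, hrc.2.1, hrc.2.2.1, hrc.2.2.2.1⟩
      · intro a ha
        rw [PySem.Set.contains_eq_decide] at ha ⊢
        simp only [Bool.not_eq_true', decide_eq_false_iff_not] at ha ⊢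
        intro hmem
        exact ha ((PySem.Set.mem_add vis (r, c) a).mpr (Or.inl hmem))
      · rw [PySem.Set.contains_eq_decide]
        simp [hrc.2.2.2.2]
      · rw [PySem.Set.contains_eq_decide]
        simp [(PySem.Set.mem_add vis (r, c) (r, c)).mpr (Or.inr rfl)]
    rw [hchild0, pvMu]
    omega
  · -- no fresh cell is marked off: the count is unchanged and the parent pays its extra 1
    have heq : ((pvGridCells maze).filter
          (fun p => !(PySem.Set.contains (PySem.Set.add vis (r, c)) p))).length =
        ((pvGridCells maze).filter (fun p => !(PySem.Set.contains vis p))).length := by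
      congr 1
      apply List.filter_congr
      intro p hp
      by_cases hin : (r, c) ∈ vis
      · rw [PySem.Set.add, if_pos (by rw [PySem.Set.contains_eq_decide]; simpa using hin)]
      · have hb := (pvMem_gridCells maze p).mp hp
        have hne : p ≠ (r, c) := by
          intro hpe; subst hpe
          exact hrc ⟨hb.1, hb.2.1, hb.2.2.1, hb.2.2.2, hin⟩
        have hiff : (p ∈ PySem.Set.add vis (r, c)) ↔ (p ∈ vis) := by
          rw [PySem.Set.mem_add]
          exact ⟨fun h => h.resolve_right hne, Or.inl⟩
        rw [PySem.Set.contains_eq_decide, PySem.Set.contains_eq_decide,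
          decide_eq_decide.mpr hiff]
    have hpar : (decide (0 ≤ r) && decide (r < (maze.length : Int)) && decide (0 ≤ c) &&
        decide (c < ((maze.headD []).length : Int)) && !(PySem.Set.contains vis (r, c))) = false := by
      rw [PySem.Set.contains_eq_decide]
      by_contra hcon
      rw [Bool.not_eq_false] at hcon
      simp only [Bool.and_eq_true, decide_eq_true_eq, Bool.not_eq_true',
        decide_eq_false_iff_not] at hcon
      exact hrc ⟨hcon.1.1.1.1, hcon.1.1.1.2, hcon.1.1.2, hcon.1.2, hcon.2⟩
    rw [hchild0, pvMu, if_neg (by rw [hpar]; simp), heq]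
    omega

def pvMinO (a : Option Int) (x : Int) : Option Int :=
  match a with
  | none => some x
  | some m => some (min m x)

def pvDfsA (maze : List (List String)) (entrance : List Int)
    (row col steps : Int) (visited : PySem.Set (Int × Int)) : Int :=
  if pvIsExit maze entrance row col then steps
  else
    let v := PySem.Set.add visited (row, col)
    let a0 : Option Int := none
    let a1 := if h1 : pvOk maze v (row - 1) col = true then
                pvMinO a0 (pvDfsA maze entrance (row - 1) col (steps + 1) v) else a0
    let a2 := if h2 : pvOk maze v (row + 1) col = true then
                pvMinO a1 (pvDfsA maze entrance (row + 1) col (steps + 1) v) else a1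
    let a3 := if h3 : pvOk maze v (row) (col - 1) = true then
                pvMinO a2 (pvDfsA maze entrance (row) (col - 1) (steps + 1) v) else a2
    let a4 := if h4 : pvOk maze v (row) (col + 1) = true then
                pvMinO a3 (pvDfsA maze entrance (row) (col + 1) (steps + 1) v) else a3
    match a4 with
    | some x => x
    | none => -1
termination_by pvMu maze visited row col
decreasing_by
  · exact pvMu_lt maze visited row col _ _ h1
  · exact pvMu_lt maze visited row col _ _ h2
  · exact pvMu_lt maze visited row col _ _ h3
  · exact pvMu_lt maze visited row col _ _ h4

def nearestExit_dfs (maze : List (List String)) (entrance : List Int) : Int :=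
  pvDfsA maze entrance (PySem.List.pyGetD entrance 0 0) (PySem.List.pyGetD entrance 1 0) 0
    PySem.Set.empty

-- ===== PORT B =====
-- n = len(maze[0])  (Source B computes it once up front)
def bN (maze : List (List String)) : Int :=
  match maze with
  | [] => 0
  | row :: _ => (row.length : Int)

-- maze[r][c]
def bAt (maze : List (List String)) (r c : Int) : String :=
  match PySem.List.pyGet? maze r with
  | none => ""
  | some row => (PySem.List.pyGet? row c).getD ""

-- the border test of Source B
def bExit (maze : List (List String)) (entrance : List Int) (r c : Int) : Bool :=
  (decide (r = 0) || decide (r = (maze.length : Int) - 1) ||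
   decide (c = 0) || decide (c = bN maze - 1)) && decide ([r, c] ≠ entrance)

-- the comprehension building nxt (candidate cell first, then its guard)
def bNbrs (maze : List (List String)) (seen : PySem.Set (Int × Int)) (r c : Int) :
    List (Int × Int) :=
  ([(r - 1, c), (r + 1, c), (r, c - 1), (r, c + 1)] : List (Int × Int)).filterMap (fun q =>
    if decide (0 ≤ q.1 ∧ q.1 < (maze.length : Int) ∧ 0 ≤ q.2 ∧ q.2 < bN maze)
       && (bAt maze q.1 q.2 == ".") && !(PySem.Set.contains seen q)
    then some q else none)

-- B's termination measure: a Finset of still-unvisited grid cells, plus a penalty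
-- when the current cell itself cannot be marked off
def bInb (maze : List (List String)) (r c : Int) : Bool :=
  decide (0 ≤ r ∧ r < (maze.length : Int) ∧ 0 ≤ c ∧ c < bN maze)
def bFree (maze : List (List String)) (seen : PySem.Set (Int × Int)) : Finset (Nat × Nat) :=
  (Finset.range maze.length ×ˢ Finset.range (maze.headD []).length).filter
    (fun p => ((p.1 : Int), (p.2 : Int)) ∉ seen)
def bMu (maze : List (List String)) (seen : PySem.Set (Int × Int)) (r c : Int) : Nat :=
  2 * (bFree maze seen).card +
  (if bInb maze r c && !(PySem.Set.contains seen (r, c)) then 0 else 1)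

theorem bN_eq (maze : List (List String)) : bN maze = ((maze.headD []).length : Int) := by
  cases maze <;> rfl

theorem bNbrs_mem (maze : List (List String)) (seen : PySem.Set (Int × Int)) (r c : Int) :
    ∀ q ∈ bNbrs maze seen r c, bInb maze q.1 q.2 = true ∧ q ∉ seen := by
  intro q hq
  unfold bNbrs at hq
  simp only [List.mem_filterMap] at hq
  obtain ⟨d, _, hcond⟩ := hq
  split at hcond
  case isTrue h =>
    cases hcond
    simp only [Bool.and_eq_true] at h
    refine ⟨h.1.1, ?_⟩
    have := h.2
    rw [PySem.Set.contains_eq_decide] at this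
    simpa using this
  case isFalse => cases hcond

theorem bStep_lt (maze : List (List String)) (seen : PySem.Set (Int × Int)) (r c : Int) :
    ∀ q ∈ bNbrs maze (PySem.Set.add seen (r, c)) r c,
      bMu maze (PySem.Set.add seen (r, c)) q.1 q.2 < bMu maze seen r c := by
  intro q hq
  obtain ⟨hqb, hqs⟩ := bNbrs_mem maze _ r c q hq
  have hqpen : (if bInb maze q.1 q.2 && !(PySem.Set.contains (PySem.Set.add seen (r, c)) (q.1, q.2)) then 0 else 1) = 0 := by
    rw [PySem.Set.contains_eq_decide, hqb]
    simp only [Bool.true_and]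
    rw [if_pos]
    simpa using hqs
  by_cases hfresh : bInb maze r c = true ∧ (r, c) ∉ seen
  · -- the current cell is freshly marked: the unvisited Finset strictly shrinks
    have hsub : bFree maze (PySem.Set.add seen (r, c)) ⊆ bFree maze seen := by
      intro p hp
      rw [bFree, Finset.mem_filter] at hp ⊢
      refine ⟨hp.1, fun hmem => hp.2 ((PySem.Set.mem_add _ _ _).mpr (Or.inl hmem))⟩
    have hbounds := hfresh.1
    rw [bInb, decide_eq_true_eq, bN_eq] at hbounds
    have hwit : (r.toNat, c.toNat) ∈ bFree maze seen := by
      rw [bFree, Finset.mem_filter, Finset.mem_product, Finset.mem_range, Finset.mem_range]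
      have h1 : ((r.toNat : Int), (c.toNat : Int)) = (r, c) := by
        rw [Int.toNat_of_nonneg hbounds.1, Int.toNat_of_nonneg hbounds.2.2.1]
      refine ⟨⟨?_, ?_⟩, ?_⟩
      · omega
      · omega
      · rw [h1]; exact hfresh.2
    have hwit' : (r.toNat, c.toNat) ∉ bFree maze (PySem.Set.add seen (r, c)) := by
      rw [bFree, Finset.mem_filter]
      rintro ⟨-, hno⟩
      apply hno
      rw [show ((r.toNat : Int), (c.toNat : Int)) = (r, c) by
        rw [Int.toNat_of_nonneg hbounds.1, Int.toNat_of_nonneg hbounds.2.2.1]]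
      exact (PySem.Set.mem_add _ _ _).mpr (Or.inr rfl)
    have hcard : (bFree maze (PySem.Set.add seen (r, c))).card < (bFree maze seen).card :=
      Finset.card_lt_card (Finset.ssubset_iff_of_subset hsub |>.mpr ⟨_, hwit, hwit'⟩)
    rw [bMu, bMu, hqpen]
    omega
  · -- nothing new is marked: cards agree and the parent pays its penalty
    have hcardeq : bFree maze (PySem.Set.add seen (r, c)) = bFree maze seen := by
      by_cases hin : (r, c) ∈ seen
      · rw [PySem.Set.add, if_pos (by rw [PySem.Set.contains_eq_decide]; simpa using hin)]
      · have hout : bInb maze r c = false := by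
          cases h : bInb maze r c
          · rfl
          · exact absurd ⟨h, hin⟩ hfresh
        rw [bInb, bN_eq] at hout
        simp only [decide_eq_false_iff_not] at hout
        unfold bFree
        apply Finset.filter_congr
        intro p hp
        rw [Finset.mem_product, Finset.mem_range, Finset.mem_range] at hp
        have hne : ((p.1 : Int), (p.2 : Int)) ≠ (r, c) := by
          intro he
          rw [Prod.mk.injEq] at he
          obtain ⟨he1, he2⟩ := he
          apply hout
          rw [← he1, ← he2]
          refine ⟨by positivity, by exact_mod_cast hp.1, by positivity, by exact_mod_cast hp.2⟩
        simp only [PySem.Set.mem_add]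
        constructor
        · intro hno hmem; exact hno (Or.inl hmem)
        · rintro hno (hmem | he)
          · exact hno hmem
          · exact hne he
    have hppen : (if bInb maze r c && !(PySem.Set.contains seen (r, c)) then 0 else 1) = 1 := by
      rw [if_neg]
      intro hcon
      rw [Bool.and_eq_true, PySem.Set.contains_eq_decide] at hcon
      exact hfresh ⟨hcon.1, by simpa using hcon.2⟩
    rw [bMu, bMu, hqpen, hcardeq, hppen]
    omega

theorem bLen_le (maze : List (List String)) (seen : PySem.Set (Int × Int)) (r c : Int) :
    (bNbrs maze seen r c).length ≤ 4 := by
  have h : (bNbrs maze seen r c).length ≤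
      ([(r - 1, c), (r + 1, c), (r, c - 1), (r, c + 1)] : List (Int × Int)).length := by
    unfold bNbrs
    exact List.length_filterMap_le _ _
  simpa using h

theorem bSum_lt (maze : List (List String)) (seen : PySem.Set (Int × Int)) (r c : Int)
    (hne : bNbrs maze (PySem.Set.add seen (r, c)) r c ≠ []) :
    ((bNbrs maze (PySem.Set.add seen (r, c)) r c).map
      (fun q => 5 ^ bMu maze (PySem.Set.add seen (r, c)) q.1 q.2)).sum
      < 5 ^ bMu maze seen r c := by
  set cs := bNbrs maze (PySem.Set.add seen (r, c)) r c with hcs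
  set M := bMu maze seen r c with hM
  obtain ⟨q0, hq0⟩ := List.exists_mem_of_ne_nil cs hne
  have hM1 : 1 ≤ M := by
    have := bStep_lt maze seen r c q0 hq0
    omega
  have hK : ∀ x ∈ cs.map (fun q => 5 ^ bMu maze (PySem.Set.add seen (r, c)) q.1 q.2),
      x ≤ 5 ^ (M - 1) := by
    intro x hx
    obtain ⟨q, hq, rfl⟩ := List.mem_map.mp hx
    exact Nat.pow_le_pow_right (by omega)
      (by have := bStep_lt maze seen r c q hq; omega)
  have hsum := List.sum_le_card_nsmul _ _ hK
  have hpow : 5 ^ M = 5 * 5 ^ (M - 1) := by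
    conv_lhs => rw [show M = (M - 1) + 1 by omega]
    ring
  have hKpos : 1 ≤ 5 ^ (M - 1) := Nat.one_le_pow _ _ (by omega)
  simp only [List.length_map, smul_eq_mul] at hsum
  calc ((cs.map (fun q => 5 ^ bMu maze (PySem.Set.add seen (r, c)) q.1 q.2)).sum)
      ≤ cs.length * 5 ^ (M - 1) := hsum
    _ ≤ 4 * 5 ^ (M - 1) := Nat.mul_le_mul_right _ (hcs ▸ bLen_le maze _ r c)
    _ < 5 * 5 ^ (M - 1) := by omega
    _ = 5 ^ M := hpow.symm

-- the while loop of Source B: pops the top frame, appends finished-path scores to outcomes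
def bLoop (maze : List (List String)) (entrance : List Int)
    (stack : List (Int × Int × Int × PySem.Set (Int × Int))) (outcomes : List Int) :
    List Int :=
  match stack with
  | [] => outcomes
  | (r, c, steps, seen) :: rest =>
    if bExit maze entrance r c then
      bLoop maze entrance rest (outcomes ++ [steps])
    else
      let seen' := PySem.Set.add seen (r, c)
      if h : bNbrs maze seen' r c = [] then
        bLoop maze entrance rest (outcomes ++ [-1])
      else
        bLoop maze entrance
          (((bNbrs maze seen' r c).map (fun q => (q.1, q.2, steps + 1, seen'))).reverse ++ rest)
          outcomes
termination_by (stack.map (fun f => 5 ^ bMu maze f.2.2.2 f.1 f.2.1)).sum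
decreasing_by
  · simp only [List.map_cons, List.sum_cons]
    have : 0 < 5 ^ bMu maze seen r c := Nat.pow_pos (by omega)
    omega
  · simp only [List.map_cons, List.sum_cons]
    have : 0 < 5 ^ bMu maze seen r c := Nat.pow_pos (by omega)
    omega
  · simp only [List.map_cons, List.sum_cons, List.map_append, List.sum_append,
      List.map_reverse, List.sum_reverse, List.map_map, Function.comp_def]
    have := bSum_lt maze seen r c h
    omega

def nearestExit_dfs_alt (maze : List (List String)) (entrance : List Int) : Int :=
  PySem.List.minD
    (bLoop maze entrance
      [(PySem.List.pyGetD entrance 0 0, PySem.List.pyGetD entrance 1 0, 0, PySem.Set.empty)] [])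
    (fun x => x) (-1)

-- ===== PRECONDITION & SPEC =====
-- helpers for Pre_: length of row i, and "every in-bounds grid neighbour of p exists"
def pvRowLen (maze : List (List String)) (i : Int) : Int :=
  (((PySem.List.pyGet? maze i).getD []).length : Int)

def pvSafeNbr (maze : List (List String)) (p : Int × Int) : Bool :=
  [(p.1 - 1, p.2), (p.1 + 1, p.2), (p.1, p.2 - 1), (p.1, p.2 + 1)].all (fun q =>
    !(decide (0 ≤ q.1) && decide (q.1 < (maze.length : Int)) && decide (0 ≤ q.2) &&
      decide (q.2 < ((maze.headD []).length : Int))) || decide (q.2 < pvRowLen maze q.1))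

-- Pre_ excludes the shapes on which the Python A raises IndexError: an entrance with fewer than
-- two coordinates; an empty maze (where A can still return 0 if the border check short-circuits
-- before maze[0] is read, a corner on which B's upfront len(maze[0]) naturally raises); and,
-- slightly wider, ragged mazes in which the grid implied by len(maze[0]) has a missing cell next
-- to the entrance or next to some non-exit '.' cell — A indexes maze[r][c] at every in-bounds
-- neighbour of a cell its search stands on, and raises iff it actually reaches a missing cell
-- (see cites).
def Pre_nearestExit_dfs (maze : List (List String)) (entrance : List Int) : Prop :=
  maze ≠ [] ∧ 2 ≤ entrance.length ∧
  pvSafeNbr maze (PySem.List.pyGetD entrance 0 0, PySem.List.pyGetD entrance 1 0) = true ∧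
  ∀ p ∈ pvGridCells maze,
    (pvCell maze p.1 p.2 == "." ∧ pvIsExit maze entrance p.1 p.2 = false) →
    pvSafeNbr maze p = true
instance (maze : List (List String)) (entrance : List Int) :
    Decidable (Pre_nearestExit_dfs maze entrance) := by unfold Pre_nearestExit_dfs; infer_instance

def pvWitness_nearestExit_dfs : List (List String) × List Int :=
  ([[".", "."], [".", "."]], [0, 0])

def Spec_nearestExit_dfs (maze : List (List String)) (entrance : List Int) (out : Int) : Prop := out = nearestExit_dfs_alt maze entrance
instance (maze : List (List String)) (entrance : List Int) (out : Int) : Decidable (Spec_nearestExit_dfs maze entrance out) := by unfold Spec_nearestExit_dfs; infer_instance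

-- ===== CLAIM (what is proved, stated in full; the proofs are below) =====
def Claim_equal_nearestExit_dfs : Prop := ∀ (maze : List (List String)) (entrance : List Int), Dom_nearestExit_dfs maze entrance → Pre_nearestExit_dfs maze entrance → Spec_nearestExit_dfs maze entrance (nearestExit_dfs maze entrance)

-- ===== LEMMAS AND PROOFS =====

-- bridges between B's helpers and A's guard expressions (used only by the proofs below)
theorem bAt_eq (maze : List (List String)) (r c : Int) : bAt maze r c = pvCell maze r c := by
  unfold bAt pvCell
  cases PySem.List.pyGet? maze r <;> simp [PySem.List.pyGet?]

theorem bExit_eq (maze : List (List String)) (entrance : List Int) (r c : Int) :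
    bExit maze entrance r c = pvIsExit maze entrance r c := by
  unfold bExit pvIsExit
  rw [bN_eq, Bool.eq_iff_iff]
  simp [decide_not]

-- the four candidate moves that pass A's guard, in A's order
def pvKids (maze : List (List String)) (v : PySem.Set (Int × Int)) (row col : Int) :
    List (Int × Int) :=
  [(row - 1, col), (row + 1, col), (row, col - 1), (row, col + 1)].filter
    (fun p => pvOk maze v p.1 p.2)

theorem bNbrs_eq (maze : List (List String)) (seen : PySem.Set (Int × Int)) (r c : Int) :
    bNbrs maze seen r c = pvKids maze seen r c := by
  have hcond : ∀ q : Int × Int,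
      (decide (0 ≤ q.1 ∧ q.1 < (maze.length : Int) ∧ 0 ≤ q.2 ∧ q.2 < bN maze)
       && (bAt maze q.1 q.2 == ".") && !(PySem.Set.contains seen q))
      = pvOk maze seen q.1 q.2 := by
    intro q
    rw [bAt_eq, bN_eq]
    simp [pvOk, Bool.decide_and, Bool.and_assoc]
  unfold bNbrs pvKids
  simp only [hcond]
  induction ([(r - 1, c), (r + 1, c), (r, c - 1), (r, c + 1)] : List (Int × Int)) with
  | nil => rfl
  | cons a t ih =>
    by_cases h : pvOk maze seen a.1 a.2 = true <;> simp [h, ih]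


-- minimum of a list of scores, -1 when empty (proof-side view of min(..., default=-1))
def pvMinL (l : List Int) : Int :=
  match l with
  | [] => -1
  | x :: t => t.foldl min x

theorem pvMinD_eq_pvMinL (l : List Int) :
    PySem.List.minD l (fun x => x) (-1) = pvMinL l := by
  cases l with
  | nil => rfl
  | cons x t => simp [PySem.List.minD, PySem.List.min?_id_cons, pvMinL]

theorem pvMin_foldl_min (xs : List Int) (b v : Int) :
    min b (xs.foldl min v) = xs.foldl min (min b v) := by
  induction xs generalizing v with
  | nil => rfl
  | cons x t ih =>
    simp only [List.foldl_cons]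
    rw [ih (min v x), min_assoc]

theorem pvFoldl_pvMinO_nonempty (x : Int) (t : List Int) (acc : Option Int) :
    (x :: t).foldl pvMinO acc = pvMinO acc (pvMinL (x :: t)) := by
  cases acc with
  | none =>
    show t.foldl pvMinO (some x) = some (pvMinL (x :: t))
    induction t generalizing x with
    | nil => rfl
    | cons y s ih => simp [List.foldl_cons, pvMinO, ih, pvMinL]
  | some b =>
    show t.foldl pvMinO (some (min b x)) = some (min b (pvMinL (x :: t)))
    have h : ∀ (v : Int), t.foldl pvMinO (some v) = some (t.foldl min v) := by
      intro v
      induction t generalizing v with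
      | nil => rfl
      | cons y s ih => simp [List.foldl_cons, pvMinO, ih]
    rw [h (min b x)]
    simp only [pvMinL]
    rw [pvMin_foldl_min]

theorem pvFoldl_pvMinO_flatMap {α : Type} (cs : List α) (f : α → List Int)
    (hf : ∀ q ∈ cs, f q ≠ []) (acc : Option Int) :
    (cs.flatMap f).foldl pvMinO acc = (cs.map (fun q => pvMinL (f q))).foldl pvMinO acc := by
  induction cs generalizing acc with
  | nil => rfl
  | cons a t ih =>
    simp only [List.flatMap_cons, List.foldl_append, List.map_cons, List.foldl_cons]
    cases hfa : f a with
    | nil => exact absurd hfa (hf a (by simp))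
    | cons x s =>
      rw [pvFoldl_pvMinO_nonempty, ← hfa]
      exact ih (fun q hq => hf q (by simp [hq])) _

theorem pvMinL_eq_getD_foldl (l : List Int) :
    pvMinL l = (l.foldl pvMinO none).getD (-1) := by
  cases l with
  | nil => rfl
  | cons x t => rw [pvFoldl_pvMinO_nonempty]; rfl

theorem pvMinO_right_comm (a : Option Int) (x y : Int) :
    pvMinO (pvMinO a x) y = pvMinO (pvMinO a y) x := by
  cases a <;> simp [pvMinO, min_comm, min_left_comm]

theorem pvMinL_perm (l1 l2 : List Int) (h : l1.Perm l2) : pvMinL l1 = pvMinL l2 := by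
  rw [pvMinL_eq_getD_foldl, pvMinL_eq_getD_foldl,
    @List.Perm.foldl_eq _ _ pvMinO _ _ ⟨fun b x y => pvMinO_right_comm b x y⟩ h none]

-- A's recursion, rewritten as a single minimum over the neighbour list
theorem pvDfsA_exit (maze : List (List String)) (entrance : List Int)
    (row col steps : Int) (vis : PySem.Set (Int × Int))
    (h : pvIsExit maze entrance row col = true) :
    pvDfsA maze entrance row col steps vis = steps := by
  rw [pvDfsA]
  simp [h]


theorem pvDfsA_nonexit (maze : List (List String)) (entrance : List Int)
    (row col steps : Int) (vis : PySem.Set (Int × Int))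
    (h : pvIsExit maze entrance row col = false) :
    pvDfsA maze entrance row col steps vis =
      match ((bNbrs maze (PySem.Set.add vis (row, col)) row col).map
          (fun p => pvDfsA maze entrance p.1 p.2 (steps + 1)
            (PySem.Set.add vis (row, col)))).foldl pvMinO none with
      | some x => x
      | none => -1 := by
  rw [pvDfsA]
  rw [if_neg (by simp [h])]
  rw [bNbrs_eq]
  by_cases h1 : pvOk maze (PySem.Set.add vis (row, col)) (row - 1) col = true <;>
  by_cases h2 : pvOk maze (PySem.Set.add vis (row, col)) (row + 1) col = true <;>
  by_cases h3 : pvOk maze (PySem.Set.add vis (row, col)) row (col - 1) = true <;>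
  by_cases h4 : pvOk maze (PySem.Set.add vis (row, col)) row (col + 1) = true <;>
  simp [h1, h2, h3, h4, pvKids, List.filter_nil]

-- the per-frame outcome list: scores of all maximal simple paths through this frame,
-- in the order Source B's stack produces them (children explored last-pushed-first)
def pvOutc (maze : List (List String)) (entrance : List Int)
    (r c steps : Int) (seen : PySem.Set (Int × Int)) : List Int :=
  if bExit maze entrance r c then [steps]
  else
    if h : bNbrs maze (PySem.Set.add seen (r, c)) r c = [] then [-1]
    else
      ((bNbrs maze (PySem.Set.add seen (r, c)) r c).reverse).attach.flatMap
        (fun q => pvOutc maze entrance q.1.1 q.1.2 (steps + 1) (PySem.Set.add seen (r, c)))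
termination_by bMu maze seen r c
decreasing_by
  exact bStep_lt maze seen r c q.1 (List.mem_reverse.mp q.2)

theorem pvOutc_spec (maze : List (List String)) (entrance : List Int) :
    ∀ (n : Nat) (r c steps : Int) (seen : PySem.Set (Int × Int)),
      bMu maze seen r c ≤ n →
      pvOutc maze entrance r c steps seen ≠ [] ∧
      pvDfsA maze entrance r c steps seen = pvMinL (pvOutc maze entrance r c steps seen) := by
  intro n
  induction n using Nat.strong_induction_on with
  | _ n ih =>
    intro r c steps seen hmu
    by_cases hx : pvIsExit maze entrance r c = true
    · rw [pvOutc, if_pos (by rw [bExit_eq]; exact hx), pvDfsA_exit _ _ _ _ _ _ hx]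
      exact ⟨by simp, rfl⟩
    · rw [pvOutc, if_neg (by rw [bExit_eq]; simpa using hx)]
      rw [pvDfsA_nonexit _ _ _ _ _ _ (by simpa using hx)]
      by_cases hnil : bNbrs maze (PySem.Set.add seen (r, c)) r c = []
      · rw [dif_pos hnil, hnil]
        exact ⟨by simp, rfl⟩
      · rw [dif_neg hnil]
        set cs := bNbrs maze (PySem.Set.add seen (r, c)) r c with hcs
        have hih : ∀ q ∈ cs,
            pvOutc maze entrance q.1 q.2 (steps + 1) (PySem.Set.add seen (r, c)) ≠ [] ∧
            pvDfsA maze entrance q.1 q.2 (steps + 1) (PySem.Set.add seen (r, c)) =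
              pvMinL (pvOutc maze entrance q.1 q.2 (steps + 1) (PySem.Set.add seen (r, c))) := by
          intro q hq
          have hlt := bStep_lt maze seen r c q hq
          exact ih (bMu maze (PySem.Set.add seen (r, c)) q.1 q.2) (by omega) q.1 q.2
            (steps + 1) (PySem.Set.add seen (r, c)) le_rfl
        have hdeatt : (cs.reverse).attach.flatMap
            (fun q => pvOutc maze entrance q.1.1 q.1.2 (steps + 1)
              (PySem.Set.add seen (r, c))) =
            (cs.reverse).flatMap
              (fun q => pvOutc maze entrance q.1 q.2 (steps + 1)
                (PySem.Set.add seen (r, c))) := by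
          simp [List.flatMap, List.map_attach_eq_pmap, List.pmap_eq_map]
        rw [hdeatt]
        set f := fun q : Int × Int =>
          pvOutc maze entrance q.1 q.2 (steps + 1) (PySem.Set.add seen (r, c)) with hf
        have hfne : ∀ q ∈ cs.reverse, f q ≠ [] := by
          intro q hq
          exact (hih q (List.mem_reverse.mp hq)).1
        have houtne : (cs.reverse).flatMap f ≠ [] := by
          obtain ⟨q0, hq0⟩ := List.exists_mem_of_ne_nil cs hnil
          simp only [ne_eq, List.flatMap_eq_nil_iff, not_forall]
          exact ⟨q0, List.mem_reverse.mpr hq0, hfne q0 (List.mem_reverse.mpr hq0)⟩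
        refine ⟨houtne, ?_⟩
        -- both sides are the minimum of the same multiset of scores
        have hmap : cs.map (fun p => pvDfsA maze entrance p.1 p.2 (steps + 1)
            (PySem.Set.add seen (r, c))) = cs.map (fun q => pvMinL (f q)) := by
          apply List.map_congr_left
          intro q hq
          exact (hih q hq).2
        rw [hmap]
        have hflat : (cs.map (fun q => pvMinL (f q))).foldl pvMinO none =
            (cs.flatMap f).foldl pvMinO none :=
          (pvFoldl_pvMinO_flatMap cs f (fun q hq => hfne q (List.mem_reverse.mpr hq)) none).symm
        rw [hflat]
        have hperm : pvMinL ((cs.reverse).flatMap f) = pvMinL (cs.flatMap f) :=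
          pvMinL_perm _ _ (List.Perm.flatMap_right f (List.reverse_perm cs))
        rw [hperm, pvMinL_eq_getD_foldl]
        cases (cs.flatMap f).foldl pvMinO none <;> rfl

-- the loop appends, frame by frame, each frame's outcome list
theorem bLoop_eq (maze : List (List String)) (entrance : List Int)
    (stack : List (Int × Int × Int × PySem.Set (Int × Int))) (outcomes : List Int) :
    bLoop maze entrance stack outcomes =
      outcomes ++ stack.flatMap (fun f => pvOutc maze entrance f.1 f.2.1 f.2.2.1 f.2.2.2) := by
  fun_induction bLoop maze entrance stack outcomes with
  | case1 acc => simp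
  | case2 acc r c steps seen rest hex ih =>
    rw [ih]
    have hfr : pvOutc maze entrance r c steps seen = [steps] := by
      rw [pvOutc, if_pos hex]
    simp [hfr]
  | case3 acc r c steps seen rest hex seenP hnil ih =>
    rw [ih]
    have hnil' : bNbrs maze (PySem.Set.add seen (r, c)) r c = [] := hnil
    have hfr : pvOutc maze entrance r c steps seen = [-1] := by
      rw [pvOutc, if_neg hex, dif_pos hnil']
    simp [hfr]
  | case4 acc r c steps seen rest hex seenP hnil ih =>
    rw [ih]
    have hnil' : ¬ bNbrs maze (PySem.Set.add seen (r, c)) r c = [] := hnil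
    have hfr : pvOutc maze entrance r c steps seen =
        ((bNbrs maze (PySem.Set.add seen (r, c)) r c).reverse).flatMap
          (fun q => pvOutc maze entrance q.1 q.2 (steps + 1) (PySem.Set.add seen (r, c))) := by
      rw [pvOutc, if_neg hex, dif_neg hnil']
      simp [List.flatMap, List.map_attach_eq_pmap, List.pmap_eq_map]
    simp [hfr, List.flatMap_append, ← List.map_reverse, List.flatMap_map]
    rfl

-- ===== VERDICT (by name: the statement is the Claim_ definition above) =====
theorem nearestExit_dfs_spec : Claim_equal_nearestExit_dfs := by
  intro maze entrance _ _
  unfold Spec_nearestExit_dfs nearestExit_dfs nearestExit_dfs_alt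
  rw [bLoop_eq, pvMinD_eq_pvMinL]
  simp only [List.flatMap_cons, List.flatMap_nil, List.append_nil, List.nil_append]
  exact (pvOutc_spec maze entrance
    (bMu maze PySem.Set.empty (PySem.List.pyGetD entrance 0 0) (PySem.List.pyGetD entrance 1 0))
    _ _ 0 PySem.Set.empty le_rfl).2
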